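-- pv_equiv track=rewrite | github.com/RajaSai3/tic-tac-toe-rl-python | Practice/ttt_tools.py | input_to_board
-- ===== SOURCE A (Python) =====
-- def input_to_board(input_index, board_state, player_symbol):
--
--     """
--
--     input_to_board(input_index, board_state, player_symbol)
--
--     It returns the a new board state based on the given input index, input board state and player symbol
--
--     Input : input_index where user wants to enter his symbol in the board,
--             board_state is the input state of teh board,
--             player_symbol is the symbol player wnats to enter in the board (like X/O).
--
--     Output : returns a new state with the input index
--
--
--     """
--
--     output_state = ''
--     for ind, val in enumerate(board_state):
--
--             if ind == input_index - 1:
--                 if val.isnumeric():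
--                     output_state+=player_symbol
--                 else:
--                     raise Exception("Cannot change already assigned board values")
--             else:
--                 output_state+=val
--
--     return output_state
-- ===== SOURCE B (Python) =====
-- def input_to_board(input_index, board_state, player_symbol):
--     i = input_index - 1
--     if 0 <= i < len(board_state):
--         if board_state[i].isnumeric():
--             return board_state[:i] + player_symbol + board_state[i + 1:]
--         raise Exception("Cannot change already assigned board values")
--     return board_state
-- ===== Notes on version B (the rewrite author's own statement) =====
-- stated objective: simpler
-- what changed: Replaces the per-character rebuild loop with direct indexing plus string slicing (board[:i] + symbol + board[i+1:]), returning the board unchanged when the index is out of range.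
import Mathlib
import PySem

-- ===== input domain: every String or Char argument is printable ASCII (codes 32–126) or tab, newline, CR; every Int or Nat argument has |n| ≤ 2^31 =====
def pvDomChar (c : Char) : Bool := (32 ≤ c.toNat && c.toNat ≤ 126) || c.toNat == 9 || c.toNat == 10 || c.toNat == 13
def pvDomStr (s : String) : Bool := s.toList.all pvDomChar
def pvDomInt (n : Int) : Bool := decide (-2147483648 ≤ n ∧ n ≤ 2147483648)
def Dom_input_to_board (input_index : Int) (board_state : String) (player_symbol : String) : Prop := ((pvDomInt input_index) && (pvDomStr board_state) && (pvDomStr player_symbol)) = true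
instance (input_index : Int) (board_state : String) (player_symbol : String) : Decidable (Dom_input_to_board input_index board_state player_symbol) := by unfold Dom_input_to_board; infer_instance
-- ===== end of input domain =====

-- B replaces A's per-character rebuild loop with direct indexing + slicing (simpler); both raise on an
-- already-assigned cell, excluded by Pre_.


-- ===== PORT A =====
-- Literal port of A: enumerate the board, build output_state by appending; 'val.isnumeric()' is
-- Chars.isdigit — exact on the ASCII Dom, where isnumeric and isdigit agree on exactly '0'..'9'.
-- On the branch where Python raises ("Cannot change already assigned board values") the port
-- appends val; such inputs are outside Pre_.
def input_to_board (input_index : Int) (board_state : String) (player_symbol : String) : String :=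
  String.ofList ((PySem.List.enumerate board_state.toList 0).foldl
    (fun acc (p : Int × Char) =>
      if p.1 = input_index - 1 then
        if PySem.Chars.isdigit p.2 then acc ++ player_symbol.toList
        else acc ++ [p.2]  -- Python raises here; excluded by Pre_
      else acc ++ [p.2]) [])

-- ===== PORT B =====
-- Port of B: direct index check, then slicing.  On the branch where Python raises the port returns
-- board_state; such inputs are outside Pre_.
def input_to_board_alt (input_index : Int) (board_state : String) (player_symbol : String) : String :=
  let i := input_index - 1
  if h : 0 ≤ i ∧ i < (board_state.toList.length : Int) then
    if PySem.Chars.isdigit (board_state.toList.getD i.toNat ' ') then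
      String.ofList (PySem.List.slice board_state.toList none (some i) ++ player_symbol.toList
        ++ PySem.List.slice board_state.toList (some (i + 1)) none)
    else board_state  -- Python raises here; excluded by Pre_
  else board_state

-- ===== PRECONDITION & SPEC =====
-- Pre_ excludes exactly the inputs (within the ASCII Dom) on which BOTH Pythons raise Exception: an
-- in-range index whose board cell is not a digit '0'..'9'; on the ASCII Dom Python's isnumeric()
-- holds for exactly '0'..'9', so no input on which A returns normally is excluded.
def Pre_input_to_board (input_index : Int) (board_state : String) (player_symbol : String) : Prop :=
  0 ≤ input_index - 1 → input_index - 1 < (board_state.toList.length : Int) →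
    PySem.Chars.isdigit (board_state.toList.getD (input_index - 1).toNat ' ') = true
instance (input_index : Int) (board_state : String) (player_symbol : String) : Decidable (Pre_input_to_board input_index board_state player_symbol) := by unfold Pre_input_to_board; infer_instance

def pvWitness_input_to_board : Int × String × String := (1, "12X", "O")

def Spec_input_to_board (input_index : Int) (board_state : String) (player_symbol : String) (out : String) : Prop := out = input_to_board_alt input_index board_state player_symbol
instance (input_index : Int) (board_state : String) (player_symbol : String) (out : String) : Decidable (Spec_input_to_board input_index board_state player_symbol out) := by unfold Spec_input_to_board; infer_instance

-- ===== CLAIM (what is proved, stated in full; the proofs are below) =====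
def Claim_equal_input_to_board : Prop := ∀ (input_index : Int) (board_state : String) (player_symbol : String), Dom_input_to_board input_index board_state player_symbol → Pre_input_to_board input_index board_state player_symbol → Spec_input_to_board input_index board_state player_symbol (input_to_board input_index board_state player_symbol)

-- ===== LEMMAS AND PROOFS =====

-- The body of A's fold, as a per-element list function.
def pvCell (t : Int) (sym : List Char) (p : Int × Char) : List Char :=
  if p.1 = t then (if PySem.Chars.isdigit p.2 then sym else [p.2]) else [p.2]

theorem pvFold_eq_flatMap (t : Int) (sym : List Char) (l : List (Int × Char)) (acc : List Char) :
    l.foldl (fun acc (p : Int × Char) =>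
      if p.1 = t then
        if PySem.Chars.isdigit p.2 then acc ++ sym else acc ++ [p.2]
      else acc ++ [p.2]) acc = acc ++ l.flatMap (pvCell t sym) := by
  have h1 : List.foldl (fun acc (p : Int × Char) =>
      if p.1 = t then
        if PySem.Chars.isdigit p.2 = true then acc ++ sym else acc ++ [p.2]
      else acc ++ [p.2]) acc l
      = List.foldl (fun acc p => acc ++ pvCell t sym p) acc l :=
    PySem.List.foldl_congr_mem l _ _ acc (by intro a p _; simp [pvCell]; split_ifs <;> rfl)
  rw [h1]
  exact PySem.List.foldl_append_eq_flatMap (pvCell t sym) l acc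

theorem pvFlatMap_out (t : Int) (sym : List Char) (l : List Char) (s : Int)
    (h : t < s ∨ s + l.length ≤ t) :
    (PySem.List.enumerate l s).flatMap (pvCell t sym) = l := by
  induction l generalizing s with
  | nil => simp [PySem.List.enumerate_nil]
  | cons x xs ih =>
    rw [PySem.List.enumerate_cons]
    simp only [List.flatMap_cons]
    have hne : s ≠ t := by simp at h; omega
    rw [pvCell]
    simp only [hne, if_false]
    rw [ih (s + 1) (by simp at h ⊢; omega)]
    rfl

theorem pvFlatMap_in (sym : List Char) (l : List Char) (s : Int) (k : Nat) (hk : k < l.length) :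
    (PySem.List.enumerate l s).flatMap (pvCell (s + k) sym) =
      l.take k ++ (if PySem.Chars.isdigit l[k] then sym else [l[k]]) ++ l.drop (k + 1) := by
  induction l generalizing s k with
  | nil => simp at hk
  | cons x xs ih =>
    rw [PySem.List.enumerate_cons]
    simp only [List.flatMap_cons]
    cases k with
    | zero =>
      have hx : pvCell (s + (0 : Nat)) sym (s, x) =
          (if PySem.Chars.isdigit x then sym else [x]) := by
        simp [pvCell]
      rw [hx, pvFlatMap_out (s + (0 : Nat)) sym xs (s + 1) (by push_cast; omega)]
      simp
    | succ k' =>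
      have hne : s ≠ s + ((k' + 1 : Nat) : Int) := by push_cast; omega
      rw [pvCell]
      simp only [hne, if_false]
      have harg : s + ((k' + 1 : Nat) : Int) = (s + 1) + (k' : Nat) := by push_cast; omega
      rw [harg, ih (s + 1) k' (by simpa using hk)]
      simp

-- ===== VERDICT =====
theorem input_to_board_spec : Claim_equal_input_to_board := by
  intro input_index board_state player_symbol _ hpre
  unfold Spec_input_to_board input_to_board input_to_board_alt
  set l := board_state.toList with hl
  rw [pvFold_eq_flatMap (input_index - 1) player_symbol.toList, List.nil_append]
  by_cases hin : 0 ≤ input_index - 1 ∧ input_index - 1 < (l.length : Int)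
  · obtain ⟨h0, h1⟩ := hin
    have hdig := hpre h0 h1
    set k : Nat := (input_index - 1).toNat with hk
    have hkl : k < l.length := by omega
    have hfm := pvFlatMap_in player_symbol.toList l 0 k hkl
    rw [show (0 : Int) + (k : Nat) = input_index - 1 by omega] at hfm
    rw [hfm, dif_pos ⟨h0, h1⟩]
    have hget : l.getD (input_index - 1).toNat ' ' = l[k] := by
      rw [← hk, List.getD_eq_getElem l ' ' hkl]
    have hdig' : PySem.Chars.isdigit l[k] = true := by rw [← hget]; exact hdig
    rw [hget, if_pos hdig', if_pos hdig']
    rw [PySem.List.slice_to _ h0, PySem.List.slice_from _ (by omega)]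
    have h2 : (input_index - 1).toNat = k := rfl
    have h3 : (input_index - 1 + 1).toNat = k + 1 := by omega
    rw [h2, h3]
  · rw [pvFlatMap_out (input_index - 1) player_symbol.toList l 0 (by omega)]
    rw [dif_neg hin]
    simp [hl]
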